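-- pv_equiv track=rewrite | github.com/pypi-data/pypi-mirror-310 | packages/xython/xython-3.2.1-py3-none-any.whl/xython/youtil.py | switch_list_2d_based_on_index
-- ===== SOURCE A (Python) =====
-- def switch_list_2d_based_on_index(input_list_2d, input_no_list):
-- 	"""
-- 	2차원의 각 1차원자료들의 index번호를 기준으로 앞뒤를 바꾸는 것
-- 	[[1,2,3,4,5], [5,6,7,8,9]] ==> [[3,4,5, 1,2], [7,8,9, 5,6]]
-- 	input_no_list.sort()
-- 	input_no_list.reverse()
--
-- 	:param input_list_2d: 2차원 형태의 리스트
-- 	:param input_no_list: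
-- 	:return:
-- 	"""
-- 	for before, after in input_no_list:
-- 		for no in range(len(input_list_2d)):
-- 			value1 = input_list_2d[no][before]
-- 			value2 = input_list_2d[no][after]
-- 			input_list_2d[no][before] = value2
-- 			input_list_2d[no][after] = value1
-- 	return input_list_2d
-- ===== SOURCE B (Python) =====
-- def switch_list_2d_based_on_index(input_list_2d, input_no_list):
-- 	for row in input_list_2d:
-- 		idx = list(range(len(row)))
-- 		for before, after in input_no_list:
-- 			idx[before], idx[after] = idx[after], idx[before]
-- 		row[:] = [row[i] for i in idx]
-- 	return input_list_2d
-- ===== Notes on version B (the rewrite author's own statement) =====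
-- stated objective: faster
-- what changed: B inverts the loop nesting: per row it replays all swaps once on a small index table (idx = range(len(row))) and then applies the net column permutation to the row in a single gather pass, instead of A's k separate swap passes over every row.
import Mathlib
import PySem

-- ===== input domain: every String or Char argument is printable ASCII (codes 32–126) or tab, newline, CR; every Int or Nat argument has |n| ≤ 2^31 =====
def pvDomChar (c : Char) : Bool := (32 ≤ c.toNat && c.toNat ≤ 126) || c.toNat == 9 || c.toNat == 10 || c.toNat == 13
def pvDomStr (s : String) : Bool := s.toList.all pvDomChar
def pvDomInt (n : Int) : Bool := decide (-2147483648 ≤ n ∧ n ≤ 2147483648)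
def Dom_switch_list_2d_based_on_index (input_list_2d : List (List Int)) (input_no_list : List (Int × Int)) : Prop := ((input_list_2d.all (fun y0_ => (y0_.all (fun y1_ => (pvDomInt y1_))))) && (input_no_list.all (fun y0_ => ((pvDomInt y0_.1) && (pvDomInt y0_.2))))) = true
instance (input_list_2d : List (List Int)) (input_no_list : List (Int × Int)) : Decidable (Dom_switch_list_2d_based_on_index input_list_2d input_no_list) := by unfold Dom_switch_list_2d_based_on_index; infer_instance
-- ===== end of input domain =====

-- B inverts the loop nesting: per row it replays all swaps once on an index table and applies the
-- net permutation in one gather pass (both Pythons mutate the rows in place identically on Pre_;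
-- the theorem is about the returned value).

-- ===== PORT A =====
-- literal transliteration of A: outer loop over pairs, inner loop over range(len(input_list_2d)),
-- reads/writes via pyGetD/pySetD (total forms; exact under Pre_, where every index is in range)
def switch_list_2d_based_on_index (input_list_2d : List (List Int)) (input_no_list : List (Int × Int)) : List (List Int) :=
  input_no_list.foldl (fun lst p =>
    (PySem.List.pyRange 0 (lst.length : Int) 1).foldl (fun lst no =>
      let row := PySem.List.pyGetD lst no []
      let value1 := PySem.List.pyGetD row p.1 0
      let value2 := PySem.List.pyGetD row p.2 0
      PySem.List.pySetD lst no (PySem.List.pySetD (PySem.List.pySetD row p.1 value2) p.2 value1))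
      lst) input_list_2d

-- ===== PORT B =====
-- literal transliteration of Source B: per row, replay the swaps on idx = list(range(len(row))),
-- then gather: row[:] = [row[i] for i in idx]
def switch_list_2d_based_on_index_alt (input_list_2d : List (List Int)) (input_no_list : List (Int × Int)) : List (List Int) :=
  input_list_2d.map (fun row =>
    let idx0 := PySem.List.pyRange 0 (row.length : Int) 1
    let idx := input_no_list.foldl (fun idx p =>
      let tmp1 := PySem.List.pyGetD idx p.2 0
      let tmp2 := PySem.List.pyGetD idx p.1 0
      PySem.List.pySetD (PySem.List.pySetD idx p.1 tmp1) p.2 tmp2) idx0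
    idx.map (fun i => PySem.List.pyGetD row i 0))

-- ===== PRECONDITION & SPEC =====
-- Pre_: every swap index is a valid Python index into every row — exactly the inputs on which A
-- (and B) return without an IndexError.
def Pre_switch_list_2d_based_on_index (input_list_2d : List (List Int)) (input_no_list : List (Int × Int)) : Prop :=
  ∀ p ∈ input_no_list, ∀ row ∈ input_list_2d,
    PySem.Raise.InRange row.length p.1 ∧ PySem.Raise.InRange row.length p.2
instance (input_list_2d : List (List Int)) (input_no_list : List (Int × Int)) : Decidable (Pre_switch_list_2d_based_on_index input_list_2d input_no_list) := by unfold Pre_switch_list_2d_based_on_index; infer_instance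

def pvWitness_switch_list_2d_based_on_index : List (List Int) × (List (Int × Int)) :=
  ([[1, 2, 3, 4, 5], [5, 6, 7, 8, 9]], [(0, 2), (1, -1)])

def Spec_switch_list_2d_based_on_index (input_list_2d : List (List Int)) (input_no_list : List (Int × Int)) (out : List (List Int)) : Prop := out = switch_list_2d_based_on_index_alt input_list_2d input_no_list
instance (input_list_2d : List (List Int)) (input_no_list : List (Int × Int)) (out : List (List Int)) : Decidable (Spec_switch_list_2d_based_on_index input_list_2d input_no_list out) := by unfold Spec_switch_list_2d_based_on_index; infer_instance

-- ===== CLAIM (what is proved, stated in full; the proofs are below) =====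
def Claim_equal_switch_list_2d_based_on_index : Prop := ∀ (input_list_2d : List (List Int)) (input_no_list : List (Int × Int)), Dom_switch_list_2d_based_on_index input_list_2d input_no_list → Pre_switch_list_2d_based_on_index input_list_2d input_no_list → Spec_switch_list_2d_based_on_index input_list_2d input_no_list (switch_list_2d_based_on_index input_list_2d input_no_list)

-- ===== LEMMAS AND PROOFS =====

-- the common swap step (A applies it to a row, B applies it to the index table)
def pvStep (p : Int × Int) (l : List Int) : List Int :=
  PySem.List.pySetD (PySem.List.pySetD l p.1 (PySem.List.pyGetD l p.2 0)) p.2 (PySem.List.pyGetD l p.1 0)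

-- normalized Nat index of an in-range Python index
def pvNidx (n : Nat) (i : Int) : Nat := (if i < 0 then i + n else i).toNat

theorem pvNidx_lt {n : Nat} {i : Int} (h : PySem.Raise.InRange n i) : pvNidx n i < n := by
  obtain ⟨h1, h2⟩ := h
  unfold pvNidx
  split <;> omega

theorem pvIdx_norm {n : Nat} {i : Int} (h : PySem.Raise.InRange n i) :
    PySem.List.pyIdx? n i = some (pvNidx n i) := by
  obtain ⟨h1, h2⟩ := h
  simp only [PySem.List.pyIdx?, pvNidx]
  split_ifs <;> first | (exfalso; omega) | (congr 1; try omega)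

theorem pvGetD_norm {xs : List Int} {i : Int} (h : PySem.Raise.InRange xs.length i) (d : Int) :
    PySem.List.pyGetD xs i d = xs.getD (pvNidx xs.length i) d := by
  simp [PySem.List.pyGetD, PySem.List.pyGet?, pvIdx_norm h, List.getD_eq_getElem?_getD]

theorem pvSetD_norm {xs : List Int} {i : Int} (h : PySem.Raise.InRange xs.length i) (v : Int) :
    PySem.List.pySetD xs i v = xs.set (pvNidx xs.length i) v := by
  simp [PySem.List.pySetD, PySem.List.pySet?, pvIdx_norm h]

theorem pvStep_length (p : Int × Int) (l : List Int) : (pvStep p l).length = l.length := by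
  simp [pvStep, PySem.List.length_pySetD]

-- pvStep under in-range indices, in terms of Nat set/getD
theorem pvStep_eq (l : List Int) (p : Int × Int)
    (h1 : PySem.Raise.InRange l.length p.1) (h2 : PySem.Raise.InRange l.length p.2) :
    pvStep p l = (l.set (pvNidx l.length p.1) (l.getD (pvNidx l.length p.2) 0)).set
        (pvNidx l.length p.2) (l.getD (pvNidx l.length p.1) 0) := by
  unfold pvStep
  rw [pvGetD_norm h2, pvGetD_norm h1, pvSetD_norm h1,
      pvSetD_norm (xs := l.set (pvNidx l.length p.1) (l.getD (pvNidx l.length p.2) 0))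
        (by rw [List.length_set]; exact h2), List.length_set]

-- gather (map of row-lookup) commutes with the swap step when lengths agree and p is in range
theorem pvGather_step (row idx : List Int) (p : Int × Int)
    (hlen : idx.length = row.length)
    (h1 : PySem.Raise.InRange row.length p.1) (h2 : PySem.Raise.InRange row.length p.2) :
    (pvStep p idx).map (fun i => PySem.List.pyGetD row i 0)
      = pvStep p (idx.map (fun i => PySem.List.pyGetD row i 0)) := by
  have h1' : PySem.Raise.InRange idx.length p.1 := by rw [hlen]; exact h1
  have h2' : PySem.Raise.InRange idx.length p.2 := by rw [hlen]; exact h2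
  have k1lt : pvNidx idx.length p.1 < idx.length := pvNidx_lt h1'
  have k2lt : pvNidx idx.length p.2 < idx.length := pvNidx_lt h2'
  have h1m : PySem.Raise.InRange (idx.map (fun i => PySem.List.pyGetD row i 0)).length p.1 := by
    simpa using h1'
  have h2m : PySem.Raise.InRange (idx.map (fun i => PySem.List.pyGetD row i 0)).length p.2 := by
    simpa using h2'
  rw [pvStep_eq idx p h1' h2', pvStep_eq _ p h1m h2m]
  simp only [List.length_map]
  rw [List.map_set, List.map_set]
  congr 1
  · congr 1
    rw [List.getD_eq_getElem _ _ k2lt, List.getD_eq_getElem _ _ (by simpa using k2lt),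
        List.getElem_map]
  · rw [List.getD_eq_getElem _ _ k1lt, List.getD_eq_getElem _ _ (by simpa using k1lt),
        List.getElem_map]

-- replaying the swaps on the index table then gathering = swapping the gathered row directly
theorem pvGather_fold (row : List Int) (ps : List (Int × Int))
    (h : ∀ p ∈ ps, PySem.Raise.InRange row.length p.1 ∧ PySem.Raise.InRange row.length p.2) :
    ∀ idx : List Int, idx.length = row.length →
      (ps.foldl (fun idx p => pvStep p idx) idx).map (fun i => PySem.List.pyGetD row i 0)
        = ps.foldl (fun r p => pvStep p r) (idx.map (fun i => PySem.List.pyGetD row i 0)) := by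
  induction ps with
  | nil => intro idx _; rfl
  | cons p t ih =>
      intro idx hlen
      have hp := h p (by simp)
      simp only [List.foldl_cons]
      rw [ih (fun q hq => h q (by simp [hq])) _ (by rw [pvStep_length, hlen]),
          pvGather_step row idx p hlen hp.1 hp.2]

-- A's inner loop over range(len(lst)), setting each index in turn, is List.map
theorem pvFold_range_set (f : List Int → List Int) :
    ∀ (post pre : List (List Int)),
      (PySem.List.pyRange (pre.length : Int) ((pre.length + post.length : Nat) : Int) 1).foldl
        (fun lst no => PySem.List.pySetD lst no (f (PySem.List.pyGetD lst no [])))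
        (pre ++ post)
      = pre ++ post.map f := by
  intro post
  induction post with
  | nil => intro pre; simp [PySem.List.pyRange_one_eq_nil]
  | cons x t ih =>
      intro pre
      rw [PySem.List.pyRange_one_cons (by simp)]
      simp only [List.foldl_cons]
      have hget : PySem.List.pyGetD (pre ++ x :: t) (pre.length : Int) [] = x := by
        simp [PySem.List.pyGetD]
      have hset : PySem.List.pySetD (pre ++ x :: t) (pre.length : Int) (f x)
          = (pre ++ [f x]) ++ t := by
        rw [PySem.List.pySetD_natCast, List.set_append]
        simp
      rw [hget, hset]
      have e1 : ((pre.length : Int) + 1) = (((pre ++ [f x]).length : Nat) : Int) := by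
        simp
      have e2 : (((pre.length + (x :: t).length : Nat)) : Int)
          = ((((pre ++ [f x]).length + t.length : Nat)) : Int) := by
        simp
        omega
      rw [e1, e2, ih (pre ++ [f x])]
      simp

-- a fold of per-element maps is a map of per-element folds (rows are independent)
theorem pvFold_map_swap (g : (Int × Int) → List Int → List Int) :
    ∀ (ps : List (Int × Int)) (l : List (List Int)),
      ps.foldl (fun acc p => acc.map (g p)) l = l.map (fun r => ps.foldl (fun r p => g p r) r) := by
  intro ps
  induction ps with
  | nil => intro l; simp
  | cons p t ih => intro l; simp [ih, List.map_map, Function.comp_def]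

-- ===== VERDICT (by name: the statement is the Claim_ definition above) =====
theorem switch_list_2d_based_on_index_spec : Claim_equal_switch_list_2d_based_on_index := by
  intro lst ps _ hpre
  unfold Spec_switch_list_2d_based_on_index switch_list_2d_based_on_index switch_list_2d_based_on_index_alt
  calc ps.foldl (fun lst p =>
        (PySem.List.pyRange 0 (lst.length : Int) 1).foldl (fun lst no =>
          let row := PySem.List.pyGetD lst no []
          let value1 := PySem.List.pyGetD row p.1 0
          let value2 := PySem.List.pyGetD row p.2 0
          PySem.List.pySetD lst no (PySem.List.pySetD (PySem.List.pySetD row p.1 value2) p.2 value1)) lst) lst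
      = ps.foldl (fun acc p => acc.map (pvStep p)) lst := by
        apply PySem.List.foldl_congr_mem
        intro acc p _
        simpa [pvStep] using pvFold_range_set (pvStep p) acc []
    _ = lst.map (fun r => ps.foldl (fun r p => pvStep p r) r) := pvFold_map_swap pvStep ps lst
    _ = _ := by
        apply List.map_congr_left
        intro row hrow
        show ps.foldl (fun r p => pvStep p r) row
          = (ps.foldl (fun idx p => pvStep p idx)
              (PySem.List.pyRange 0 (row.length : Int) 1)).map
                (fun i => PySem.List.pyGetD row i 0)
        rw [pvGather_fold row ps (fun p hp => hpre p hp row hrow) _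
              (by simp [PySem.List.length_pyRange_one])]
        have hbase := PySem.List.map_pyGetD_pyRange_zero row 0
        simp only [PySem.List.len] at hbase
        rw [hbase]
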